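-- pv_equiv track=rewrite | github.com/anil1703/100days-coding-challange | Day 1/day1.py | check
-- ===== SOURCE A (Python) =====
-- def check(A,b):
--     vowels = {'a', 'e', 'i', 'o', 'u'}
--     if A <= 3:
--         return "YES"
--     count = 0
--     for char in b:
--         if char not in vowels:
--             count += 1
--         else:
--             count = 0
--         if count >= 4:
--             return "NO"
--     return "YES"
-- ===== SOURCE B (Python) =====
-- def check(A, b):
--     if A <= 3:
--         return "YES"
--     vowels = "aeiou"
--     if any(w not in vowels and x not in vowels and y not in vowels and z not in vowels
--            for (w, x, y, z) in zip(b, b[1:], b[2:], b[3:])):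
--         return "NO"
--     return "YES"
-- ===== Notes on version B (the rewrite author's own statement) =====
-- stated objective: alternative
-- what changed: B tests each width-4 sliding window (built by zipping the string with its three shifts) for being all consonants, instead of A's running consonant counter that resets on vowels and early-returns.
import Mathlib
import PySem

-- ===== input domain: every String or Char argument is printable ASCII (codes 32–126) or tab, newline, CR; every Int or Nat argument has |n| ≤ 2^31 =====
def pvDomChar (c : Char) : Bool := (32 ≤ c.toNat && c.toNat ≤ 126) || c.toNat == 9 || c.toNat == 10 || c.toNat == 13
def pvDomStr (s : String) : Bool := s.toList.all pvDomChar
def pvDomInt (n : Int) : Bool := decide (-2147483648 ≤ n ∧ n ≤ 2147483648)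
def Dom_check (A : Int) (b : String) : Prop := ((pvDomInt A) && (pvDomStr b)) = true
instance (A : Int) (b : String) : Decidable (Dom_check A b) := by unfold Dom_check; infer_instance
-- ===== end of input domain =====

-- B replaces A's resetting consonant counter by a sliding-window test (zip of the string with its three shifts); same value everywhere.

-- ===== PORT A =====
-- the 'for char in b' loop with the running count and the early 'return "NO"'
def checkLoop (vowels : PySem.Set Char) : List Char → Int → String
  | [], _ => "YES"
  | ch :: rest, count =>
    let count := if !(vowels.contains ch) then count + 1 else 0
    if count ≥ 4 then "NO" else checkLoop vowels rest count

def check (A : Int) (b : String) : String :=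
  let vowels : PySem.Set Char := PySem.Set.ofList ['a', 'e', 'i', 'o', 'u']
  if A ≤ 3 then "YES"
  else checkLoop vowels b.toList 0

-- ===== PORT B =====
-- zip(b, b[1:], b[2:], b[3:])
def zip4 : List Char → List Char → List Char → List Char → List (Char × Char × Char × Char)
  | w :: ws, x :: xs, y :: ys, z :: zs => (w, x, y, z) :: zip4 ws xs ys zs
  | _, _, _, _ => []

def check_alt (A : Int) (b : String) : String :=
  if A ≤ 3 then "YES"
  else
    let vowels : List Char := "aeiou".toList
    let cs := b.toList
    if (zip4 cs (PySem.List.slice cs (some 1) none) (PySem.List.slice cs (some 2) none)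
          (PySem.List.slice cs (some 3) none)).any
        (fun q => !(vowels.contains q.1) && !(vowels.contains q.2.1) &&
                  !(vowels.contains q.2.2.1) && !(vowels.contains q.2.2.2))
    then "NO" else "YES"

-- ===== PRECONDITION & SPEC =====
def Spec_check (A : Int) (b : String) (out : String) : Prop := out = check_alt A b
instance (A : Int) (b : String) (out : String) : Decidable (Spec_check A b out) := by unfold Spec_check; infer_instance

-- ===== CLAIM (what is proved, stated in full; the proofs are below) =====
def Claim_equal_check : Prop := ∀ (A : Int) (b : String), Dom_check A b → Spec_check A b (check A b)

-- ===== LEMMAS AND PROOFS =====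

def consB (c : Char) : Bool := !(("aeiou".toList).contains c)

-- 'the first n chars exist and are all consonants'
def allConsTake : List Char → Nat → Bool
  | _, 0 => true
  | [], _ + 1 => false
  | c :: l, n + 1 => consB c && allConsTake l n

def anyWin (l : List Char) : Bool :=
  (zip4 l (l.drop 1) (l.drop 2) (l.drop 3)).any
    (fun q => consB q.1 && consB q.2.1 && consB q.2.2.1 && consB q.2.2.2)

lemma anyWin_cons (x : Char) (t : List Char) :
    anyWin (x :: t) = (allConsTake (x :: t) 4 || anyWin t) := by
  match t with
  | [] => simp [anyWin, zip4, allConsTake]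
  | [a] => simp [anyWin, zip4, allConsTake]
  | [a, b] => simp [anyWin, zip4, allConsTake]
  | a :: b :: c :: rest =>
    simp [anyWin, zip4, allConsTake, List.any_cons, Bool.and_assoc]

lemma allConsTake_mono {t : List Char} {m n : Nat} (h : m ≤ n)
    (hn : allConsTake t n = true) : allConsTake t m = true := by
  induction t generalizing m n with
  | nil =>
    cases n with
    | zero => cases Nat.le_zero.mp h; exact hn
    | succ k => simp [allConsTake] at hn
  | cons c l ih =>
    cases m with
    | zero => rfl
    | succ m' =>
      cases n with
      | zero => omega
      | succ n' =>
        simp only [allConsTake, Bool.and_eq_true] at hn ⊢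
        exact ⟨hn.1, ih (Nat.succ_le_succ_iff.mp h) hn.2⟩

lemma allConsTake4_anyWin (l : List Char) (h : allConsTake l 4 = true) : anyWin l = true := by
  match l with
  | [] => simp [allConsTake] at h
  | [a] => simp [allConsTake] at h
  | [a, b] => simp [allConsTake] at h
  | [a, b, c] => simp [allConsTake] at h
  | a :: b :: c :: d :: rest =>
    simp only [allConsTake, Bool.and_eq_true] at h
    simp [anyWin, zip4, List.any_cons, h.1, h.2.1, h.2.2.1, h.2.2.2.1]

lemma contains_set_eq (ch : Char) :
    (PySem.Set.ofList ['a', 'e', 'i', 'o', 'u']).contains ch = ("aeiou".toList).contains ch := by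
  have : PySem.Set.ofList ['a', 'e', 'i', 'o', 'u'] = ['a', 'e', 'i', 'o', 'u'] := by decide
  rw [this]
  rfl

lemma checkLoop_eq (l : List Char) (c : Int) (h0 : 0 ≤ c) (h3 : c ≤ 3) :
    checkLoop (PySem.Set.ofList ['a', 'e', 'i', 'o', 'u']) l c =
      (if (anyWin l || allConsTake l (4 - c).toNat) = true then "NO" else "YES") := by
  induction l generalizing c with
  | nil =>
    have hk : (4 - c).toNat = ((4 - c).toNat - 1) + 1 := by omega
    rw [hk]
    simp [checkLoop, anyWin, zip4, allConsTake]
  | cons ch t ih =>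
    rw [checkLoop, contains_set_eq, anyWin_cons]
    by_cases hv : ("aeiou".toList.contains ch) = true
    · -- vowel: count resets to 0
      rw [if_neg (show ¬((!("aeiou".toList.contains ch)) = true) by rw [hv]; decide)]
      rw [if_neg (show ¬((0 : Int) ≥ 4) by norm_num)]
      have ih0 := ih 0 (by omega) (by omega)
      rw [show ((4 : Int) - 0).toNat = 4 by decide] at ih0
      rw [ih0]
      have hvow : consB ch = false := by unfold consB; rw [hv]; rfl
      have hhead : allConsTake (ch :: t) (4 - c).toNat = false := by
        have hk : (4 - c).toNat = ((4 - c).toNat - 1) + 1 := by omega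
        rw [hk]
        simp [allConsTake, hvow]
      have h4f : allConsTake (ch :: t) 4 = false := by
        simp [allConsTake, hvow]
      rw [hhead, h4f]
      simp only [Bool.false_or, Bool.or_false]
      by_cases hat : allConsTake t 4 = true
      · rw [hat, allConsTake4_anyWin t hat]
        rfl
      · have hf : allConsTake t 4 = false := by
          cases hq : allConsTake t 4 <;> simp_all
        rw [hf]
        simp
    · -- consonant: count becomes c + 1
      have hv' : ("aeiou".toList.contains ch) = false := by
        cases hq : ("aeiou".toList.contains ch) <;> simp_all
      have hcons : consB ch = true := by unfold consB; rw [hv']; rfl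
      rw [if_pos (show ((!("aeiou".toList.contains ch)) = true) by rw [hv']; rfl)]
      by_cases hc3 : c = 3
      · -- count hits 4: A returns "NO"
        rw [if_pos (show c + 1 ≥ 4 by omega)]
        have hk : (4 - c).toNat = 1 := by omega
        rw [hk]
        simp [allConsTake, hcons]
      · rw [if_neg (show ¬(c + 1 ≥ 4) by omega)]
        rw [ih (c + 1) (by omega) (by omega)]
        have hk : (4 - c).toNat = (4 - (c + 1)).toNat + 1 := by omega
        rw [hk]
        have hstep : allConsTake (ch :: t) ((4 - (c + 1)).toNat + 1)
            = allConsTake t (4 - (c + 1)).toNat := by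
          simp [allConsTake, hcons]
        rw [hstep]
        congr 1
        cases h4h : allConsTake (ch :: t) 4 with
        | false => simp
        | true =>
          have h3' : allConsTake t 3 = true := by
            simpa [allConsTake, hcons] using h4h
          have : allConsTake t (4 - (c + 1)).toNat = true :=
            allConsTake_mono (by omega) h3'
          simp [this]

lemma anyWin_eq_port (cs : List Char) :
    (zip4 cs (PySem.List.slice cs (some 1) none) (PySem.List.slice cs (some 2) none)
        (PySem.List.slice cs (some 3) none)).any
      (fun q => !(("aeiou".toList).contains q.1) && !(("aeiou".toList).contains q.2.1) &&
                !(("aeiou".toList).contains q.2.2.1) && !(("aeiou".toList).contains q.2.2.2))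
      = anyWin cs := by
  have e1 : PySem.List.slice cs (some 1) none = cs.drop 1 := by
    simpa using PySem.List.slice_from_natCast (xs := cs) (a := 1)
  have e2 : PySem.List.slice cs (some 2) none = cs.drop 2 := by
    simpa using PySem.List.slice_from_natCast (xs := cs) (a := 2)
  have e3 : PySem.List.slice cs (some 3) none = cs.drop 3 := by
    simpa using PySem.List.slice_from_natCast (xs := cs) (a := 3)
  rw [e1, e2, e3]
  rfl

-- ===== VERDICT (by name: the statement is the Claim_ definition above) =====
theorem check_spec : Claim_equal_check := by
  intro A b _
  unfold Spec_check check check_alt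
  by_cases hA : A ≤ 3
  · simp [hA]
  · simp only [hA, if_false]
    rw [anyWin_eq_port]
    rw [checkLoop_eq b.toList 0 (by omega) (by omega)]
    have hk : ((4 : Int) - 0).toNat = 4 := by decide
    rw [hk]
    congr 1
    cases hw : anyWin b.toList with
    | true => simp
    | false =>
      simp only [Bool.false_or]
      cases h4 : allConsTake b.toList 4 with
      | false => rfl
      | true => rw [allConsTake4_anyWin b.toList h4] at hw; exact absurd hw (by simp)
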